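-- pv_equiv track=rewrite | github.com/lizhi16/dockerfile_analysis_framework | pkg/dockerfile_parser/filters.py | env_filter
-- ===== SOURCE A (Python) =====
-- from collections import OrderedDict
--
-- def _strip_quote(value):
--     """
--     Removing the quotes around the edges
--     """
--
--     if value.startswith('"') and value.endswith('"'):
--         value = value[1:-1]
--     elif value.startswith("'") and value.endswith("'"):
--         value = value[1:-1]
--
--     return value
--
-- def _strip_backslash(value):
--     """
--     Remove backslashes from the string
--     """
--
--     return ' '.join(value.replace('\\', '').split())
--
-- def _key_value_splitter(value):
--     """
--     Separation `key=value` in the convenient form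
--     """
--
--     value = _strip_backslash(value)
--
--     if '=' not in value:
--         return [value]
--
--     values, i = OrderedDict(), 0
--     for line in value.split():
--         if '=' in line:
--             values[i] = [line]
--             i += 1
--         else:
--             values[i - 1].append(line)
--
--     return [' '.join(v) for v in [k[1] for k in values.items()]]
--
-- def env_filter(items, value):
--     """
--     Specification:
--         ENV <key> <value>
--         ENV <key>=<value> ...
--     """
--
--     if '=' in value:
--         for env in _key_value_splitter(value):
--             variable, value = env.split('=')
--             items[variable] = _strip_quote(value)
--     else:
--         split = _strip_backslash(value).split()
--         if len(split) >= 2: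
--             variable, value = split[0], ' '.join(split[1:])
--             items[variable] = _strip_quote(value)
--
--     return items
-- ===== SOURCE B (Python) =====
-- def _strip_quote(value):
--     if value.startswith('"') and value.endswith('"'):
--         value = value[1:-1]
--     elif value.startswith("'") and value.endswith("'"):
--         value = value[1:-1]
--     return value
--
--
-- def _strip_backslash(value):
--     return ' '.join(value.replace('\\', '').split())
--
--
-- def env_filter(items, value):
--     """
--     Specification:
--         ENV <key> <value>
--         ENV <key>=<value> ...
--     Single left-to-right pass over the tokens: no intermediate
--     OrderedDict-of-groups, no re-splitting of joined groups.
--     """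
--
--     if '=' in value:
--         var, vals = None, []
--         for tok in _strip_backslash(value).split():
--             if '=' in tok:
--                 if var is not None:
--                     items[var] = _strip_quote(' '.join(vals))
--                 var, first = tok.split('=')
--                 vals = [first]
--             else:
--                 vals.append(tok)
--         if var is not None:
--             items[var] = _strip_quote(' '.join(vals))
--     else:
--         split = _strip_backslash(value).split()
--         if len(split) >= 2:
--             items[split[0]] = _strip_quote(' '.join(split[1:]))
--
--     return items
-- ===== Notes on version B (the rewrite author's own statement) =====
-- stated objective: simpler
-- what changed: A builds an OrderedDict of integer-indexed token groups and then re-splits each space-joined group on '='; B makes a single left-to-right pass over the tokens, keeping the current variable name and its pending value tokens and flushing an entry whenever a new 'key=' token starts (and once at the end).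
import Mathlib
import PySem

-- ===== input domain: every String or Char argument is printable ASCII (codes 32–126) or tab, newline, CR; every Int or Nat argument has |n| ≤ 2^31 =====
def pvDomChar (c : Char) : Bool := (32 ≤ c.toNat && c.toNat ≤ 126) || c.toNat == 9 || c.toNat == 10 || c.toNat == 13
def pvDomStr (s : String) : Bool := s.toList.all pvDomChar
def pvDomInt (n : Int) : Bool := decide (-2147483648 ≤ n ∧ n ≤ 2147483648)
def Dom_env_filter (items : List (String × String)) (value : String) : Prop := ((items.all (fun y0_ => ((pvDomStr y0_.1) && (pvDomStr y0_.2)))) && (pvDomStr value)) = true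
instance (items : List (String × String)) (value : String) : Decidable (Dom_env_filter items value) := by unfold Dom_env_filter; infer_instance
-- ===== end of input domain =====

-- B replaces A's two-phase grouping (OrderedDict of token groups, then re-split of
-- each joined group) by a single left-to-right pass over the tokens; same returned
-- dict (and the Python B performs the same in-place mutation of `items`).

-- ===== PORT A =====

-- _strip_quote
def pvStripQuote (value : String) : String :=
  if PySem.Str.startswith value "\"" && PySem.Str.endswith value "\"" then
    PySem.Str.slice value (some 1) (some (-1))
  else if PySem.Str.startswith value "'" && PySem.Str.endswith value "'" then
    PySem.Str.slice value (some 1) (some (-1))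
  else value

-- _strip_backslash
def pvStripBackslash (value : String) : String :=
  PySem.Str.join " " (PySem.Str.split₀ (PySem.Str.replace value "\\" ""))

-- body of the loop in _key_value_splitter.  Python raises KeyError when
-- values[i-1] is missing (first token without '='); that happens only outside
-- Pre_env_filter (here `modify` would create the entry instead).
def pvAStep (st : PySem.Dict Int (List String) × Int) (line : String) :
    PySem.Dict Int (List String) × Int :=
  if PySem.Str.isIn "=" line then (st.1.insert st.2 [line], st.2 + 1)
  else (st.1.modify (st.2 - 1) [] (fun vs => vs ++ [line]), st.2)

-- _key_value_splitter
def pvKeyValueSplitter (value : String) : List String :=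
  let v := pvStripBackslash value
  if !(PySem.Str.isIn "=" v) then [v]
  else
    let st := (PySem.Str.split₀ v).foldl pvAStep (PySem.Dict.empty, 0)
    st.1.items.map (fun p => PySem.Str.join " " p.2)

-- body of the `for env in _key_value_splitter(value)` loop.
-- `variable, value = env.split('=')` raises ValueError unless the split has
-- exactly 2 parts; that happens only outside Pre_env_filter (`getD` stands in).
def pvAIns (d : PySem.Dict String String) (env : String) : PySem.Dict String String :=
  let parts := (PySem.Str.split? env "=").getD []
  d.insert (parts.getD 0 "") (pvStripQuote (parts.getD 1 ""))

def env_filter (items : List (String × String)) (value : String) : List (String × String) :=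
  let d := PySem.Dict.ofList items
  if PySem.Str.isIn "=" value then
    ((pvKeyValueSplitter value).foldl pvAIns d).items
  else
    let split := PySem.Str.split₀ (pvStripBackslash value)
    if split.length ≥ 2 then
      (d.insert (split.headD "") (pvStripQuote (PySem.Str.join " " (split.drop 1)))).items
    else d.items

-- ===== PORT B =====

-- `if var is not None: items[var] = _strip_quote(' '.join(vals))`
def pvFlush (d : PySem.Dict String String) (var : Option String) (vals : List String) :
    PySem.Dict String String :=
  match var with
  | none => d
  | some v => d.insert v (pvStripQuote (PySem.Str.join " " vals))

-- B's single `for tok in ...` loop with state (items, var, vals), plus the final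
-- flush.  `var, first = tok.split('=')` raises ValueError unless the split has
-- exactly 2 parts; that happens only outside Pre_env_filter (`getD` stands in).
def pvEnvLoop (d : PySem.Dict String String) (var : Option String) (vals : List String) :
    List String → PySem.Dict String String
  | [] => pvFlush d var vals
  | tok :: rest =>
    if PySem.Str.isIn "=" tok then
      let parts := (PySem.Str.split? tok "=").getD []
      pvEnvLoop (pvFlush d var vals) (some (parts.getD 0 "")) [parts.getD 1 ""] rest
    else pvEnvLoop d var (vals ++ [tok]) rest

def env_filter_alt (items : List (String × String)) (value : String) : List (String × String) :=
  let d := PySem.Dict.ofList items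
  if PySem.Str.isIn "=" value then
    (pvEnvLoop d none [] (PySem.Str.split₀ (pvStripBackslash value))).items
  else
    let split := PySem.Str.split₀ (pvStripBackslash value)
    if split.length ≥ 2 then
      (d.insert (split.headD "") (pvStripQuote (PySem.Str.join " " (split.drop 1)))).items
    else d.items

-- ===== PRECONDITION & SPEC =====

-- Pre_ excludes exactly the inputs on which A raises: with '=' in value, a first
-- token without '=' (KeyError on values[-1]) or a token containing two or more
-- '=' (ValueError from the 2-tuple unpacking of env.split('=')).
def Pre_env_filter (items : List (String × String)) (value : String) : Prop :=
  PySem.Str.isIn "=" value = true →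
    PySem.Str.isIn "=" (pvStripBackslash value) = true ∧
    PySem.Str.isIn "=" ((PySem.Str.split₀ (pvStripBackslash value)).headD "") = true ∧
    ∀ t ∈ PySem.Str.split₀ (pvStripBackslash value),
      ((PySem.Str.split? t "=").getD []).length ≤ 2

instance (items : List (String × String)) (value : String) :
    Decidable (Pre_env_filter items value) := by unfold Pre_env_filter; infer_instance

def pvWitness_env_filter : (List (String × String)) × String :=
  ([("PATH", "/usr")], "a=1 b c=\"2 3\"")

def Spec_env_filter (items : List (String × String)) (value : String) (out : List (String × String)) : Prop := out = env_filter_alt items value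
instance (items : List (String × String)) (value : String) (out : List (String × String)) : Decidable (Spec_env_filter items value out) := by unfold Spec_env_filter; infer_instance

-- ===== CLAIM (what is proved, stated in full; the proofs are below) =====
def Claim_equal_env_filter : Prop := ∀ (items : List (String × String)) (value : String), Dom_env_filter items value → Pre_env_filter items value → Spec_env_filter items value (env_filter items value)

-- ===== LEMMAS AND PROOFS =====

-- `split('=')` on a list of characters, as the obvious structural recursion
-- (proved equal to PySem.Chars.splitOn below).
def pvMS (pre : List Char) : List Char → List (List Char)
  | [] => [pre]
  | c :: rest => if c = '=' then pre :: pvMS [] rest else pvMS (pre ++ [c]) rest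

-- A's grouping of the token list: a new group starts at each token containing '='.
def pvGrp (cur : List String) : List String → List (List String)
  | [] => [cur]
  | t :: ts => if PySem.Str.isIn "=" t then cur :: pvGrp [t] ts else pvGrp (cur ++ [t]) ts

theorem pvGo_spec : ∀ (l : List Char) (fuel : Nat) (cur : List Char) (acc : List (List Char)),
    l.length < fuel →
    PySem.Chars.splitOn.go ['='] fuel l cur acc = acc.reverse ++ pvMS cur.reverse l := by
  intro l
  induction l with
  | nil =>
    intro fuel cur acc h
    match fuel, h with
    | (n+1), _ => simp [PySem.Chars.splitOn.go, pvMS]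
  | cons c rest ih =>
    intro fuel cur acc h
    match fuel, h with
    | (n+1), h =>
      rw [PySem.Chars.splitOn.go]
      simp only [List.isPrefixOf_cons₂, List.isPrefixOf_nil_left, Bool.and_true]
      by_cases hc : c = '='
      · subst hc
        simp only [beq_self_eq_true, if_pos, List.length_cons, List.length_nil,
          List.drop_succ_cons, List.drop_zero]
        rw [ih _ _ _ (by simpa using Nat.lt_of_succ_lt_succ h)]
        simp [pvMS]
      · have : ('=' == c) = false := by simpa using fun hh => hc hh.symm
        simp only [this, Bool.false_eq_true, if_false]
        rw [ih _ _ _ (by simpa using Nat.lt_of_succ_lt_succ h)]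
        simp [pvMS, hc]

theorem pvSplitOn_eq (l : List Char) : PySem.Chars.splitOn l ['='] = pvMS [] l := by
  simpa using pvGo_spec l (l.length + 1) [] [] (Nat.lt_succ_self _)

theorem pvSplit?_eq (t : String) :
    (PySem.Str.split? t "=").getD [] = (pvMS [] t.toList).map String.ofList := by
  simp [PySem.Str.split?, PySem.Chars.split?, pvSplitOn_eq]

theorem pvMS_ne_nil : ∀ (l : List Char) (pre : List Char), pvMS pre l ≠ [] := by
  intro l
  induction l with
  | nil => intro pre; simp [pvMS]
  | cons c rest ih => intro pre; by_cases hc : c = '=' <;> simp [pvMS, hc, ih]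

theorem pvMS_eq_cons (pre rest) : pvMS pre ('=' :: rest) = pre :: pvMS [] rest := by
  simp [pvMS]

theorem pvMS_ne_cons (pre c rest) (hc : ¬ c = '=') :
    pvMS pre (c :: rest) = pvMS (pre ++ [c]) rest := by
  simp [pvMS, hc]

theorem pvMS_no : ∀ (l : List Char), '=' ∉ l → ∀ pre, pvMS pre l = [pre ++ l] := by
  intro l
  induction l with
  | nil => intro _ pre; simp [pvMS]
  | cons c rest ih =>
    intro h pre
    have hc : ¬ c = '=' := by intro hh; exact h (hh ▸ List.mem_cons_self)
    have hr : '=' ∉ rest := fun hh => h (List.mem_cons_of_mem _ hh)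
    simp [pvMS, hc, ih hr]

theorem pvMS_single : ∀ (l : List Char) (pre q), pvMS pre l = [q] → '=' ∉ l ∧ q = pre ++ l := by
  intro l
  induction l with
  | nil => intro pre q h; simp [pvMS] at h; simp [h]
  | cons c rest ih =>
    intro pre q h
    by_cases hc : c = '='
    · subst hc
      rw [pvMS_eq_cons] at h
      have hlen := congrArg List.length h
      simp at hlen
      exact absurd hlen (pvMS_ne_nil _ _)
    · rw [pvMS_ne_cons _ _ _ hc] at h
      obtain ⟨h1, h2⟩ := ih _ _ h
      constructor
      · intro hm
        rcases List.mem_cons.mp hm with hm | hm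
        · exact hc hm.symm
        · exact h1 hm
      · simp [h2]

theorem pvMS_two_le : ∀ (l : List Char), '=' ∈ l → ∀ pre, 2 ≤ (pvMS pre l).length := by
  intro l
  induction l with
  | nil => intro h; simp at h
  | cons c rest ih =>
    intro h pre
    by_cases hc : c = '='
    · subst hc
      rw [pvMS_eq_cons, List.length_cons]
      have : 1 ≤ (pvMS [] rest).length := List.length_pos_iff.mpr (pvMS_ne_nil _ _)
      omega
    · have hr : '=' ∈ rest := by
        rcases List.mem_cons.mp h with hm | hm
        · exact absurd hm.symm hc
        · exact hm
      rw [pvMS_ne_cons _ _ _ hc]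
      exact ih hr _

theorem pvMS_append (ys : List Char) (hys : '=' ∉ ys) :
    ∀ (xs pre a b), pvMS pre xs = [a, b] → pvMS pre (xs ++ ys) = [a, b ++ ys] := by
  intro xs
  induction xs with
  | nil => intro pre a b h; simp [pvMS] at h
  | cons c rest ih =>
    intro pre a b h
    by_cases hc : c = '='
    · subst hc
      rw [pvMS_eq_cons] at h
      have ha : pre = a := by
        have := congrArg (List.headD · []) h; simpa using this
      have hb : pvMS [] rest = [b] := by
        have := congrArg List.tail h; simpa using this
      obtain ⟨hnr, hbr⟩ := pvMS_single rest [] b hb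
      have : '=' ∉ rest ++ ys := by
        intro hm; rcases List.mem_append.mp hm with hm | hm
        · exact hnr hm
        · exact hys hm
      rw [List.cons_append, pvMS_eq_cons, pvMS_no _ this []]
      simp [ha, hbr]
    · rw [pvMS_ne_cons _ _ _ hc] at h
      rw [List.cons_append, pvMS_ne_cons _ _ _ hc]
      exact ih _ _ _ h

theorem pvIsIn_mem (t : String) : PySem.Str.isIn "=" t = true ↔ '=' ∈ t.toList := by
  rw [PySem.Str.isIn_iff_infix]
  have h : ("=" : String).toList = ['='] := rfl
  rw [h, List.singleton_infix_iff]

theorem pvIsIn_not_mem (t : String) (h : PySem.Str.isIn "=" t = false) : '=' ∉ t.toList := by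
  intro hm
  have := (pvIsIn_mem t).mpr hm
  rw [h] at this
  exact Bool.false_ne_true this

theorem pvGrp_pos (cur t ts) (h : PySem.Str.isIn "=" t = true) :
    pvGrp cur (t :: ts) = cur :: pvGrp [t] ts := by
  simp only [pvGrp]; rw [if_pos h]

theorem pvGrp_neg (cur t ts) (h : ¬ PySem.Str.isIn "=" t = true) :
    pvGrp cur (t :: ts) = pvGrp (cur ++ [t]) ts := by
  simp only [pvGrp]; rw [if_neg h]

theorem pvEnvLoop_pos (d var vals t rest) (h : PySem.Str.isIn "=" t = true) :
    pvEnvLoop d var vals (t :: rest)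
      = pvEnvLoop (pvFlush d var vals)
          (some (((PySem.Str.split? t "=").getD []).getD 0 ""))
          [((PySem.Str.split? t "=").getD []).getD 1 ""] rest := by
  simp only [pvEnvLoop]; rw [if_pos h]

theorem pvEnvLoop_neg (d var vals t rest) (h : ¬ PySem.Str.isIn "=" t = true) :
    pvEnvLoop d var vals (t :: rest) = pvEnvLoop d var (vals ++ [t]) rest := by
  simp only [pvEnvLoop]; rw [if_neg h]

theorem pvAStep_pos (st line) (h : PySem.Str.isIn "=" line = true) :
    pvAStep st line = (st.1.insert st.2 [line], st.2 + 1) := by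
  unfold pvAStep; rw [if_pos h]

theorem pvAStep_neg (st line) (h : ¬ PySem.Str.isIn "=" line = true) :
    pvAStep st line = (st.1.modify (st.2 - 1) [] (fun vs => vs ++ [line]), st.2) := by
  unfold pvAStep; rw [if_neg h]

-- a token containing '=' whose split has at most 2 parts splits into exactly 2
theorem pvTok_two (t : String) (h1 : PySem.Str.isIn "=" t = true)
    (h2 : ((PySem.Str.split? t "=").getD []).length ≤ 2) :
    ∃ a b, pvMS [] t.toList = [a, b] := by
  rw [pvSplit?_eq, List.length_map] at h2
  have hge := pvMS_two_le t.toList ((pvIsIn_mem t).mp h1) []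
  have hlen : (pvMS [] t.toList).length = 2 := le_antisymm h2 hge
  rcases List.length_eq_two.mp hlen with ⟨a, b, hab⟩
  exact ⟨a, b, hab⟩

theorem pvIntercalate_cons (sep x : List Char) (xs : List (List Char)) :
    List.intercalate sep (x :: xs) = x ++ (xs.flatMap (fun y => sep ++ y)) := by
  induction xs generalizing x with
  | nil => simp [List.intercalate]
  | cons y ys ih => simp_all [List.intercalate, List.intersperse]

-- ' '.join(x :: tail) at the character level
theorem pvJoin_cons (x : String) (tail : List String) :
    (PySem.Str.join " " (x :: tail)).toList
      = x.toList ++ tail.flatMap (fun u => ' ' :: u.toList) := by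
  simp [PySem.Str.join, PySem.Chars.join, String.toList_ofList, pvIntercalate_cons,
    List.flatMap_map]

theorem pvJoinTail_no_eq (tail : List String) (h : ∀ u ∈ tail, PySem.Str.isIn "=" u = false) :
    '=' ∉ tail.flatMap (fun u => ' ' :: u.toList) := by
  intro hm
  rcases List.mem_flatMap.mp hm with ⟨u, hu, hmu⟩
  rcases List.mem_cons.mp hmu with hc | hc
  · exact absurd hc (by decide)
  · exact pvIsIn_not_mem u (h u hu) hc

-- A's action on one (joined) group
def pvAG (d : PySem.Dict String String) (g : List String) : PySem.Dict String String :=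
  pvAIns d (PySem.Str.join " " g)

-- A's per-group insert equals B's flush of the corresponding pending state
theorem pvAG_flush (d : PySem.Dict String String) (t0 : String) (tail : List String)
    (var first : String)
    (hsp : pvMS [] t0.toList = [var.toList, first.toList])
    (htail : ∀ u ∈ tail, PySem.Str.isIn "=" u = false) :
    pvAG d (t0 :: tail) = pvFlush d (some var) (first :: tail) := by
  unfold pvAG pvAIns pvFlush
  have hJ := pvJoinTail_no_eq tail htail
  have hsplit : pvMS [] (PySem.Str.join " " (t0 :: tail)).toList
      = [var.toList, first.toList ++ tail.flatMap (fun u => ' ' :: u.toList)] := by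
    rw [pvJoin_cons]
    exact pvMS_append _ hJ _ _ _ _ hsp
  rw [pvSplit?_eq, hsplit]
  have hval : String.ofList (first.toList ++ tail.flatMap (fun u => ' ' :: u.toList))
      = PySem.Str.join " " (first :: tail) := by
    rw [← pvJoin_cons, String.ofList_toList]
  simp [String.ofList_toList, hval]

-- the invariant of A's OrderedDict-building loop
theorem pvDictFold : ∀ (ts : List String) (d : PySem.Dict Int (List String)) (i : Int)
    (prev : List (Int × List String)) (cur : List String),
    d.items = prev ++ [(i - 1, cur)] →
    (∀ p ∈ prev, p.1 < i - 1) →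
    ((ts.foldl pvAStep (d, i)).1.items).map Prod.snd = prev.map Prod.snd ++ pvGrp cur ts := by
  intro ts
  induction ts with
  | nil =>
    intro d i prev cur hitems hlt
    simp [pvGrp, hitems]
  | cons t ts ih =>
    intro d i prev cur hitems hlt
    rw [List.foldl_cons]
    by_cases ht : PySem.Str.isIn "=" t = true
    · rw [pvAStep_pos _ _ ht]
      have hnc : d.contains i = false := by
        simp only [PySem.Dict.contains, hitems, List.any_eq_false]
        intro p hp
        simp only [beq_iff_eq]
        rcases List.mem_append.mp hp with hp | hp
        · have := hlt p hp; omega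
        · have hpe : p = (i - 1, cur) := by simpa using hp
          rw [hpe]
          intro hh
          have h2 : i - 1 = i := hh
          omega
      have hins : (d.insert i [t]).items
          = (prev ++ [(i - 1, cur)]) ++ [((i + 1) - 1, [t])] := by
        simp only [PySem.Dict.insert, hnc, Bool.false_eq_true, if_false, hitems]
        norm_num
      have hres := ih (d.insert i [t]) (i + 1) (prev ++ [(i - 1, cur)]) [t] hins ?_
      · rw [hres, pvGrp_pos _ _ _ ht]
        simp
      · intro p hp
        rcases List.mem_append.mp hp with hp | hp
        · have := hlt p hp; omega
        · have hpe : p = (i - 1, cur) := by simpa using hp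
          rw [hpe]
          show i - 1 < i + 1 - 1
          omega
    · rw [pvAStep_neg _ _ ht]
      have hfind : List.find? (fun p => p.1 == (i - 1)) d.items = some (i - 1, cur) := by
        rw [hitems, List.find?_append]
        have hnone : List.find? (fun p => p.1 == (i - 1)) prev = none := by
          rw [List.find?_eq_none]
          intro p hp
          have := hlt p hp
          simp only [beq_iff_eq]
          omega
        simp [hnone]
      have hget : d.getD (i - 1) [] = cur := by
        simp [PySem.Dict.getD, PySem.Dict.get?, hfind]
      have hc : d.contains (i - 1) = true := by
        simp only [PySem.Dict.contains, hitems, List.any_append, List.any_cons, List.any_nil]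
        simp
      have hstep : d.modify (i - 1) [] (fun vs => vs ++ [t]) = d.insert (i - 1) (cur ++ [t]) := by
        rw [PySem.Dict.modify, hget]
      rw [hstep]
      have hins : (d.insert (i - 1) (cur ++ [t])).items = prev ++ [(i - 1, cur ++ [t])] := by
        simp only [PySem.Dict.insert, hc, hitems, List.map_append, List.map_cons,
          List.map_nil, beq_self_eq_true, if_pos]
        congr 1
        conv_rhs => rw [← List.map_id prev]
        refine List.map_congr_left ?_
        intro p hp
        have := hlt p hp
        have hne : (p.1 == (i - 1)) = false := by
          simp only [beq_eq_false_iff_ne, ne_eq]; omega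
        simp [hne]
      have hres := ih (d.insert (i - 1) (cur ++ [t])) i prev (cur ++ [t]) hins hlt
      rw [hres, pvGrp_neg _ _ _ ht]

-- MAIN: folding A's insert over the remaining groups = B's loop over the tokens
theorem pvMain : ∀ (ts : List String) (d : PySem.Dict String String) (t0 : String)
    (tail : List String) (var first : String),
    pvMS [] t0.toList = [var.toList, first.toList] →
    (∀ u ∈ tail, PySem.Str.isIn "=" u = false) →
    (∀ t ∈ ts, ((PySem.Str.split? t "=").getD []).length ≤ 2) →
    (pvGrp (t0 :: tail) ts).foldl pvAG d = pvEnvLoop d (some var) (first :: tail) ts := by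
  intro ts
  induction ts with
  | nil =>
    intro d t0 tail var first hsp htail _
    simp only [pvGrp, List.foldl_cons, List.foldl_nil, pvEnvLoop]
    exact pvAG_flush d t0 tail var first hsp htail
  | cons t ts ih =>
    intro d t0 tail var first hsp htail hts
    by_cases ht : PySem.Str.isIn "=" t = true
    · rcases pvTok_two t ht (hts t List.mem_cons_self) with ⟨a, b, hab⟩
      have hparts : (PySem.Str.split? t "=").getD [] = [String.ofList a, String.ofList b] := by
        rw [pvSplit?_eq, hab]; rfl
      rw [pvGrp_pos _ _ _ ht, List.foldl_cons, pvEnvLoop_pos _ _ _ _ _ ht, hparts]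
      rw [pvAG_flush d t0 tail var first hsp htail]
      simp only [List.getD_cons_zero, List.getD_cons_succ]
      exact ih _ t [] (String.ofList a) (String.ofList b)
        (by simp [String.toList_ofList, hab]) (by simp)
        (fun u hu => hts u (List.mem_cons_of_mem _ hu))
    · rw [pvGrp_neg _ _ _ ht, pvEnvLoop_neg _ _ _ _ _ ht]
      rw [show (t0 :: tail) ++ [t] = t0 :: (tail ++ [t]) from rfl,
        show (first :: tail) ++ [t] = first :: (tail ++ [t]) from rfl]
      exact ih d t0 (tail ++ [t]) var first hsp
        (by
          intro u hu
          rcases List.mem_append.mp hu with hu | hu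
          · exact htail u hu
          · simp at hu; subst hu; simpa using eq_false_of_ne_true ht)
        (fun u hu => hts u (List.mem_cons_of_mem _ hu))

-- ===== VERDICT (by name: the statement is the Claim_ definition above) =====
theorem env_filter_spec : Claim_equal_env_filter := by
  intro items value _hdom hpre
  unfold Spec_env_filter env_filter env_filter_alt
  by_cases hv : PySem.Str.isIn "=" value = true
  · obtain ⟨hv2, hhead, hts⟩ := hpre hv
    have hv2' : PySem.Chars.isIn ['='] (pvStripBackslash value).toList = true := by
      simpa using hv2
    rw [if_pos hv, if_pos hv]
    cases hcase : PySem.Str.split₀ (pvStripBackslash value) with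
    | nil => rw [hcase] at hhead; exact absurd hhead (by decide)
    | cons t0 rest =>
      rw [hcase] at hhead hts
      have ht0 : PySem.Str.isIn "=" t0 = true := by simpa using hhead
      rcases pvTok_two t0 ht0 (hts t0 List.mem_cons_self) with ⟨a, b, hab⟩
      have hparts : (PySem.Str.split? t0 "=").getD [] = [String.ofList a, String.ofList b] := by
        rw [pvSplit?_eq, hab]; rfl
      -- A side: the key-value splitter produces the joined groups
      have hkv : pvKeyValueSplitter value = (pvGrp [t0] rest).map (PySem.Str.join " ") := by
        simp only [pvKeyValueSplitter]
        rw [hcase, if_neg (by simp [hv2'])]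
        rw [List.foldl_cons, pvAStep_pos _ _ ht0]
        rw [show ((PySem.Dict.empty, (0 : Int)).1.insert (PySem.Dict.empty, (0 : Int)).2 [t0],
              (PySem.Dict.empty, (0 : Int)).2 + 1)
            = (PySem.Dict.empty.insert (0 : Int) [t0], (1 : Int)) from rfl]
        have hitems : (PySem.Dict.empty.insert (0 : Int) [t0]).items
            = ([] : List (Int × List String)) ++ [((1 : Int) - 1, [t0])] := by
          simp [PySem.Dict.insert, PySem.Dict.contains, PySem.Dict.empty]
        have hfold := pvDictFold rest (PySem.Dict.empty.insert 0 [t0]) 1 [] [t0] hitems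
          (by simp)
        rw [show (fun p : Int × List String => PySem.Str.join " " p.2)
            = (fun vs => PySem.Str.join " " vs) ∘ Prod.snd from rfl, ← List.map_map, hfold]
        simp
      rw [hkv, List.foldl_map]
      -- B side
      rw [pvEnvLoop_pos _ _ _ _ _ ht0, hparts]
      simp only [List.getD_cons_zero, List.getD_cons_succ, pvFlush]
      exact congrArg PySem.Dict.items
        (pvMain rest (PySem.Dict.ofList items) t0 [] (String.ofList a) (String.ofList b)
          (by simp [String.toList_ofList, hab]) (by simp)
          (fun u hu => hts u (List.mem_cons_of_mem _ hu)))
  · rw [if_neg hv, if_neg hv]
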